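-- pv_equiv track=rewrite | github.com/aphoticshaman/HungryOrca | evolutionary_arc_solver.py | tile_3x3
-- ===== SOURCE A (Python) =====
-- def tile_3x3(g):
--     h, w = len(g), len(g[0]) if g else 0
--     r = [[0]*(w*3) for _ in range(h*3)]
--     for ty in range(3):
--         for tx in range(3):
--             for y in range(h):
--                 for x in range(w):
--                     r[ty*h+y][tx*w+x] = g[y][x]
--     return r
-- ===== SOURCE B (Python) =====
-- def tile_3x3(g):
--     w = len(g[0]) if g else 0
--     rows = [row[:w] * 3 for row in g]
--     return [r[:] for r in rows * 3]
-- ===== Notes on version B (the rewrite author's own statement) =====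
-- stated objective: simpler
-- what changed: Replaces the four nested ty/tx/y/x per-cell assignment loops into a preallocated zero matrix by one comprehension that tiles each row horizontally with row[:w]*3 and one list repetition rows*3 (with row copies) for the vertical tiling.
import Mathlib
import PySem

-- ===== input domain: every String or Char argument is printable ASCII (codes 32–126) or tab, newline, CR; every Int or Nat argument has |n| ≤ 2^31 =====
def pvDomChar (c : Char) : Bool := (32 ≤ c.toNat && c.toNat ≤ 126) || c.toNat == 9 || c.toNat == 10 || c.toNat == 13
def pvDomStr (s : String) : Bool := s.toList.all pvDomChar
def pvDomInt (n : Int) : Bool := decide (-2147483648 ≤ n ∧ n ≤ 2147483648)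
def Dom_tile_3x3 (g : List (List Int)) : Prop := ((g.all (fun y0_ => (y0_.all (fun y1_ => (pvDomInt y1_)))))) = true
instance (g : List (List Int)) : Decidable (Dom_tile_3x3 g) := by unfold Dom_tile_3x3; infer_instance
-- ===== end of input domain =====

-- B replaces A's four nested per-cell assignment loops by horizontal tiling of each row (row[:w]*3)
-- followed by list repetition for the vertical tiling; return values agree wherever A returns.

-- ===== PORT A =====
-- Literal port: nested ty/tx/y/x loops writing into a preallocated zero matrix.
-- All writes r[ty*h+y][tx*w+x] are in range; the read g[y][x] raises IndexError in Python
-- exactly when len(g[y]) < w — those inputs are excluded by Pre_ below, so getD's default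
-- is never used inside Pre_.
def tile_3x3 (g : List (List Int)) : List (List Int) :=
  let h := g.length
  let w := match g with | [] => 0 | r :: _ => r.length
  let r0 := List.replicate (h*3) (List.replicate (w*3) (0:Int))
  (List.range 3).foldl (fun r ty =>
    (List.range 3).foldl (fun r tx =>
      (List.range h).foldl (fun r y =>
        (List.range w).foldl (fun r x =>
          r.set (ty*h+y) ((r.getD (ty*h+y) []).set (tx*w+x) ((g.getD y []).getD x 0))) r) r) r) r0

-- ===== PORT B =====
-- Source B: w = len(g[0]) if g else 0; rows = [row[:w] * 3 for row in g]; return [r[:] for r in rows * 3]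
-- row[:w] with w ≥ 0 is List.take w; list * 3 is three concatenated copies; r[:] copies are
-- identity on immutable Lean lists.
def tile_3x3_alt (g : List (List Int)) : List (List Int) :=
  let w := match g with | [] => 0 | r :: _ => r.length
  let rows := g.map (fun row => row.take w ++ (row.take w ++ row.take w))
  rows ++ (rows ++ rows)

-- ===== PRECONDITION & SPEC =====
-- Pre_ excludes exactly the inputs on which A raises IndexError: grids with some row shorter
-- than the first row (A reads g[y][x] for every x < len(g[0])). A returns on every input
-- satisfying Pre_.
def Pre_tile_3x3 (g : List (List Int)) : Prop :=
  ∀ row ∈ g, (g.headD []).length ≤ row.length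
instance (g : List (List Int)) : Decidable (Pre_tile_3x3 g) := by unfold Pre_tile_3x3; infer_instance
def pvWitness_tile_3x3 : List (List Int) := [[1, 2], [3, 4]]

def Spec_tile_3x3 (g : List (List Int)) (out : List (List Int)) : Prop := out = tile_3x3_alt g
instance (g : List (List Int)) (out : List (List Int)) : Decidable (Spec_tile_3x3 g out) := by unfold Spec_tile_3x3; infer_instance

-- ===== CLAIM (what is proved, stated in full; the proofs are below) =====
def Claim_equal_tile_3x3 : Prop := ∀ (g : List (List Int)), Dom_tile_3x3 g → Pre_tile_3x3 g → Spec_tile_3x3 g (tile_3x3 g)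

-- ===== LEMMAS AND PROOFS =====

-- Setting a row to itself is the identity.
lemma pv_set_getD_self (r : List (List Int)) (i : Nat) : r.set i (r.getD i []) = r := by
  by_cases h : i < r.length
  · rw [List.getD_eq_getElem _ _ h]
    exact List.set_getElem_self h
  · exact List.set_eq_of_length_le (Nat.le_of_not_lt h)

lemma pv_foldl_set_nil (xs : List Nat) (e : Nat → Nat) (v : Nat → Int) :
    xs.foldl (fun (row : List Int) x => row.set (e x) (v x)) [] = [] := by
  induction xs with
  | nil => rfl
  | cons x xs ih => simpa using ih

-- A fold that repeatedly edits the single row i equals one set of that row to the folded row.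
lemma pv_foldl_set_row (xs : List Nat) (i : Nat) (e : Nat → Nat) (v : Nat → Int) :
    ∀ (r : List (List Int)),
      xs.foldl (fun r x => r.set i ((r.getD i []).set (e x) (v x))) r
        = r.set i (xs.foldl (fun row x => row.set (e x) (v x)) (r.getD i [])) := by
  induction xs with
  | nil => intro r; simp only [List.foldl_nil]; exact (pv_set_getD_self r i).symm
  | cons x xs ih =>
    intro r
    simp only [List.foldl_cons]
    rw [ih]
    by_cases h : i < r.length
    · have hg : (r.set i ((r.getD i []).set (e x) (v x))).getD i [] = (r.getD i []).set (e x) (v x) := by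
        simp [List.getD, List.getElem?_set_self h]
      rw [hg, List.set_set]
    · have hl : r.length ≤ i := Nat.le_of_not_lt h
      have hd : r.getD i [] = [] := List.getD_eq_default _ _ hl
      rw [List.set_eq_of_length_le (by simpa using hl), hd]
      simp only [List.set_nil, pv_foldl_set_nil]

-- Writing src[0..n) into row at offset o replaces exactly that segment.
lemma pv_writeRow : ∀ (n o : Nat) (src row : List Int), n ≤ src.length → o + n ≤ row.length →
    (List.range n).foldl (fun acc x => acc.set (o + x) (src.getD x 0)) row
      = row.take o ++ (src.take n ++ row.drop (o + n)) := by
  intro n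
  induction n with
  | zero => intro o src row _ _; simp
  | succ n ih =>
    intro o src row hs hr
    obtain ⟨a, t, rfl⟩ : ∃ a t, src = a :: t := by
      cases src with
      | nil => simp at hs
      | cons a t => exact ⟨a, t, rfl⟩
    rw [List.range_succ_eq_map]
    simp only [List.foldl_cons, List.foldl_map]
    have ho : o < row.length := by omega
    have hA : (row.take o).length = o := by simp; omega
    have h0 : row.set (o + 0) ((a :: t).getD 0 0)
        = (row.take o ++ [a]) ++ row.drop (o + 1) := by
      simp [List.set_eq_take_append_cons_drop, ho]
    have hfun : (fun (acc : List Int) x => acc.set (o + Nat.succ x) ((a :: t).getD (Nat.succ x) 0))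
        = fun acc x => acc.set ((o + 1) + x) (t.getD x 0) := by
      funext acc x
      have : o + Nat.succ x = (o + 1) + x := by omega
      rw [this]
      rfl
    rw [h0, hfun]
    have hlen : ((row.take o ++ [a]) ++ row.drop (o + 1)).length = row.length := by
      simp; omega
    rw [ih (o + 1) t ((row.take o ++ [a]) ++ row.drop (o + 1)) (by simpa using hs) (by omega)]
    have hAa : (row.take o ++ [a]).length = o + 1 := by simp [hA]
    rw [List.take_left' hAa, List.drop_append]
    have : ((row.take o ++ [a]).drop (o + 1 + n)) = [] := by
      apply List.drop_eq_nil_of_le; omega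
    rw [this, List.nil_append, hAa]
    have h1 : o + 1 + n - (o + 1) = n := by omega
    rw [h1, List.drop_drop]
    have h2 : o + 1 + n = o + (n + 1) := by omega
    simp [List.append_assoc, h2]

-- mapIdx over replicate is a map over range.
lemma pv_mapIdx_replicate {β : Type} : ∀ (n : Nat) (F : Nat → List Int → β) (z : List Int),
    List.mapIdx F (List.replicate n z) = (List.range n).map (fun y => F y z) := by
  intro n
  induction n with
  | zero => intro F z; simp
  | succ n ih =>
    intro F z
    rw [List.replicate_succ, List.mapIdx_cons, List.range_succ_eq_map, List.map_cons,
        List.map_map, ih]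
    rfl

-- mapIdx over a map over range fuses into one map over range.
lemma pv_mapIdx_map_range {β : Type} : ∀ (n : Nat) (F : Nat → List Int → β) (φ : Nat → List Int),
    List.mapIdx F ((List.range n).map φ) = (List.range n).map (fun y => F y (φ y)) := by
  intro n
  induction n with
  | zero => intro F φ; simp
  | succ n ih =>
    intro F φ
    rw [List.range_succ_eq_map, List.map_cons, List.mapIdx_cons, List.map_map, ih,
        List.map_cons, List.map_map]
    rfl

-- Indexing map over range recovers an ordinary map.
lemma pv_map_getD_range {β : Type} (f : List Int → β) :
    ∀ (l : List (List Int)), (List.range l.length).map (fun y => f (l.getD y [])) = l.map f := by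
  intro l
  induction l with
  | nil => simp
  | cons a t ih =>
    rw [List.length_cons, List.range_succ_eq_map, List.map_cons, List.map_map]
    simp only [List.getD_cons_zero, List.map_cons, Function.comp_def, Nat.succ_eq_add_one,
      List.getD_cons_succ]
    rw [ih]

lemma pv_getD_append_length (pre : List (List Int)) (b : List Int) (l : List (List Int)) :
    (pre ++ b :: l).getD pre.length [] = b := by
  induction pre with
  | nil => simp
  | cons p ps ih => simp [ih]

lemma pv_set_append_length (pre : List (List Int)) (b c : List Int) (l : List (List Int)) :
    (pre ++ b :: l).set pre.length c = pre ++ c :: l := by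
  induction pre with
  | nil => simp
  | cons p ps ih => simp [ih]

-- One y-loop (with its inner x-loop editing row p+y) rewrites the middle block row by row.
lemma pv_yloop (xs : List Nat) :
    ∀ (mid : List (List Int)) (e : Nat → Nat → Nat) (v : Nat → Nat → Int) (p : Nat)
      (pre post : List (List Int)) (n : Nat), p = pre.length → n = mid.length →
    (List.range n).foldl
        (fun r y => xs.foldl
          (fun r x => r.set (p + y) ((r.getD (p + y) []).set (e y x) (v y x))) r)
        (pre ++ (mid ++ post))
      = pre ++ (List.mapIdx (fun y row => xs.foldl (fun row x => row.set (e y x) (v y x)) row) mid ++ post) := by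
  intro mid
  induction mid with
  | nil => intro e v p pre post n hp hn; subst hn; simp
  | cons b t ih =>
    intro e v p pre post n hp hn
    subst hp hn
    rw [List.length_cons, List.range_succ_eq_map]
    simp only [List.foldl_cons, List.foldl_map]
    rw [List.cons_append, pv_foldl_set_row xs (pre.length + 0) (e 0) (v 0)]
    have h0 : pre.length + 0 = pre.length := by omega
    rw [h0, pv_getD_append_length, pv_set_append_length]
    set B0 : List Int := xs.foldl (fun row x => row.set (e 0 x) (v 0 x)) b with hB0
    have hshape : pre ++ B0 :: (t ++ post) = (pre ++ [B0]) ++ (t ++ post) := by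
      simp
    rw [hshape]
    have hfun : (fun (r : List (List Int)) y => xs.foldl
          (fun r x => r.set (pre.length + Nat.succ y) ((r.getD (pre.length + Nat.succ y) []).set (e (Nat.succ y) x) (v (Nat.succ y) x))) r)
        = fun (r : List (List Int)) y => xs.foldl
          (fun r x => r.set ((pre ++ [B0]).length + y) ((r.getD ((pre ++ [B0]).length + y) []).set (e (y + 1) x) (v (y + 1) x))) r := by
      funext r y
      have : pre.length + Nat.succ y = (pre ++ [B0]).length + y := by simp; omega
      rw [this]
    rw [hfun, ih (fun y x => e (y + 1) x) (fun y x => v (y + 1) x) (pre ++ [B0]).length (pre ++ [B0]) post t.length rfl rfl]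
    rw [List.mapIdx_cons]
    simp only [List.append_assoc, List.cons_append, List.nil_append]
    rw [← hB0]

-- Source-row facts inside Pre_.
lemma pv_src_len (g : List (List Int)) (w : Nat) (hw : ∀ row ∈ g, w ≤ row.length)
    (y : Nat) (hy : y < g.length) : w ≤ (g.getD y []).length := by
  rw [List.getD_eq_getElem _ _ hy]
  exact hw _ (List.getElem_mem hy)

-- Unrolling a fold over range 3 (used once, on the outer ty-loop).
lemma pv_unroll3 {α : Type} (F : α → Nat → α) (init : α) :
    (List.range 3).foldl F init = F (F (F init 0) 1) 2 := rfl

-- One full ty-block (tx = 0,1,2 over a zero block of g.length rows) produces the tripled rows.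
lemma pv_block (g : List (List Int)) (w : Nat) (hw : ∀ row ∈ g, w ≤ row.length)
    (p : Nat) (pre post : List (List Int)) (hp : p = pre.length) :
    (List.range 3).foldl (fun r tx =>
        (List.range g.length).foldl (fun r y =>
          (List.range w).foldl (fun r x =>
            r.set (p + y) ((r.getD (p + y) []).set (tx*w+x) ((g.getD y []).getD x 0))) r) r)
      (pre ++ (List.replicate g.length (List.replicate (w*3) (0:Int)) ++ post))
    = pre ++ (g.map (fun row => row.take w ++ (row.take w ++ row.take w)) ++ post) := by
  subst hp
  have hsrc : ∀ y, y < g.length → w ≤ (g.getD y []).length := fun y hy => pv_src_len g w hw y hy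
  have h3 : List.range 3 = [0, 1, 2] := rfl
  rw [h3]
  simp only [List.foldl_cons, List.foldl_nil]
  -- tx = 0
  rw [pv_yloop (List.range w) (List.replicate g.length (List.replicate (w*3) (0:Int)))
      (fun _ x => 0*w+x) (fun y x => (g.getD y []).getD x 0) pre.length pre post g.length rfl
      (by simp)]
  have hm1 : List.mapIdx
        (fun y row => (List.range w).foldl (fun row x => row.set (0*w+x) ((g.getD y []).getD x 0)) row)
        (List.replicate g.length (List.replicate (w*3) (0:Int)))
      = (List.range g.length).map
          (fun y => (g.getD y []).take w ++ List.replicate (w*3 - w) (0:Int)) := by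
    rw [pv_mapIdx_replicate]
    apply List.map_congr_left
    intro y hy
    rw [List.mem_range] at hy
    rw [pv_writeRow w (0*w) (g.getD y []) _ (hsrc y hy) (by simp only [List.length_replicate]; omega)]
    simp [List.take_replicate, List.drop_replicate]
  rw [hm1]
  -- tx = 1
  rw [pv_yloop (List.range w)
      ((List.range g.length).map (fun y => (g.getD y []).take w ++ List.replicate (w*3 - w) (0:Int)))
      (fun _ x => 1*w+x) (fun y x => (g.getD y []).getD x 0) pre.length pre post g.length rfl
      (by simp)]
  have hm2 : List.mapIdx
        (fun y row => (List.range w).foldl (fun row x => row.set (1*w+x) ((g.getD y []).getD x 0)) row)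
        ((List.range g.length).map (fun y => (g.getD y []).take w ++ List.replicate (w*3 - w) (0:Int)))
      = (List.range g.length).map
          (fun y => (g.getD y []).take w ++ ((g.getD y []).take w ++ List.replicate (w*3 - (w+w)) (0:Int))) := by
    rw [pv_mapIdx_map_range]
    apply List.map_congr_left
    intro y hy
    rw [List.mem_range] at hy
    have hsw : ((g.getD y []).take w).length = w := by
      simp only [List.length_take]
      have := hsrc y hy; omega
    have hl1 : ((g.getD y []).take w ++ List.replicate (w*3 - w) (0:Int)).length = w*3 := by
      simp only [List.length_append, List.length_replicate, hsw]; omega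
    rw [pv_writeRow w (1*w) (g.getD y []) _ (hsrc y hy) (by rw [hl1]; omega)]
    rw [show (1*w : Nat) = w by omega]
    rw [List.take_left' hsw, List.drop_append]
    rw [show ((g.getD y []).take w).drop (w + w) = [] from List.drop_eq_nil_of_le (by rw [hsw]; omega)]
    rw [List.nil_append, hsw, List.drop_replicate]
    rw [show w*3 - w - (w + w - w) = w*3 - (w + w) by omega]
  rw [hm2]
  -- tx = 2
  rw [pv_yloop (List.range w)
      ((List.range g.length).map
        (fun y => (g.getD y []).take w ++ ((g.getD y []).take w ++ List.replicate (w*3 - (w+w)) (0:Int))))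
      (fun _ x => 2*w+x) (fun y x => (g.getD y []).getD x 0) pre.length pre post g.length rfl
      (by simp)]
  have hm3 : List.mapIdx
        (fun y row => (List.range w).foldl (fun row x => row.set (2*w+x) ((g.getD y []).getD x 0)) row)
        ((List.range g.length).map
          (fun y => (g.getD y []).take w ++ ((g.getD y []).take w ++ List.replicate (w*3 - (w+w)) (0:Int))))
      = (List.range g.length).map
          (fun y => (g.getD y []).take w ++ ((g.getD y []).take w ++ (g.getD y []).take w)) := by
    rw [pv_mapIdx_map_range]
    apply List.map_congr_left
    intro y hy
    rw [List.mem_range] at hy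
    have hsw : ((g.getD y []).take w).length = w := by
      simp only [List.length_take]
      have := hsrc y hy; omega
    have hl2 : ((g.getD y []).take w ++ ((g.getD y []).take w ++ List.replicate (w*3 - (w+w)) (0:Int))).length = w*3 := by
      simp only [List.length_append, List.length_replicate, hsw]; omega
    rw [pv_writeRow w (2*w) (g.getD y []) _ (hsrc y hy) (by rw [hl2]; omega)]
    rw [List.take_append, List.drop_append]
    rw [show ((g.getD y []).take w).take (2*w) = (g.getD y []).take w from
      List.take_of_length_le (by rw [hsw]; omega)]
    rw [show ((g.getD y []).take w).drop (2*w + w) = [] from List.drop_eq_nil_of_le (by rw [hsw]; omega)]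
    rw [List.nil_append, hsw]
    rw [List.take_append, List.drop_append]
    rw [show ((g.getD y []).take w).take (2*w - w) = (g.getD y []).take w from
      List.take_of_length_le (by rw [hsw]; omega)]
    rw [show ((g.getD y []).take w).drop (2*w + w - w) = [] from List.drop_eq_nil_of_le (by rw [hsw]; omega)]
    rw [List.nil_append, hsw, List.take_replicate, List.drop_replicate]
    rw [show min (2*w - w - w) (w*3 - (w+w)) = 0 by omega]
    rw [show w*3 - (w+w) - (2*w + w - w - w) = 0 by omega]
    simp
  rw [hm3]
  rw [pv_map_getD_range (fun row => row.take w ++ (row.take w ++ row.take w)) g]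

-- ===== VERDICT (by name: the statement is the Claim_ definition above) =====
theorem tile_3x3_spec : Claim_equal_tile_3x3 := by
  unfold Claim_equal_tile_3x3 Spec_tile_3x3
  intro g _ hpre
  cases g with
  | nil => decide
  | cons a t =>
    have hw : ∀ row ∈ (a :: t), a.length ≤ row.length := by
      intro row h
      simpa using hpre row h
    simp only [tile_3x3, tile_3x3_alt]
    rw [pv_unroll3]
    rw [show (a :: t).length * 3 = (a :: t).length + ((a :: t).length + (a :: t).length) by ring,
        List.replicate_add, List.replicate_add]
    have e0 := pv_block (a :: t) a.length hw (0 * (a :: t).length) []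
      (List.replicate (a :: t).length (List.replicate (a.length*3) (0:Int)) ++
       List.replicate (a :: t).length (List.replicate (a.length*3) (0:Int))) (by simp)
    simp only [List.nil_append] at e0
    rw [e0]
    have e1 := pv_block (a :: t) a.length hw (1 * (a :: t).length)
      ((a :: t).map (fun row => row.take a.length ++ (row.take a.length ++ row.take a.length)))
      (List.replicate (a :: t).length (List.replicate (a.length*3) (0:Int))) (by simp)
    rw [e1]
    have e2 := pv_block (a :: t) a.length hw (2 * (a :: t).length)
      ((a :: t).map (fun row => row.take a.length ++ (row.take a.length ++ row.take a.length)) ++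
       (a :: t).map (fun row => row.take a.length ++ (row.take a.length ++ row.take a.length))) []
      (by rw [List.length_append, List.length_map]; omega)
    simp only [List.append_nil, List.append_assoc] at e2
    rw [e2]
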